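-- pv_equiv track=rewrite | github.com/faridmaamri/PythonLearning | PCAP_EDUBE_LAB_Soduku.py | validSubsqr
-- ===== SOURCE A (Python) =====
-- def validSubsqr (table,start,end):
--     st=[]
--     for i in range (start,end):
--         for j in range (start,end):
--             if table[i][j] in st:
--                 return False
--             st.append(table[i][j])
--     return True
-- ===== SOURCE B (Python) =====
-- def validSubsqr(table, start, end):
--     values = [table[i][j] for i in range(start, end) for j in range(start, end)]
--     return len(values) == len(set(values))
-- ===== Notes on version B (the rewrite author's own statement) =====
-- stated objective: simpler
-- what changed: Removes A's incremental membership scan with early return: B flattens all subsquare cells into one list with a comprehension and decides validity by a single terminal len(values) == len(set(values)) comparison.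
-- outside the precondition, e.g. on validSubsqr([[1, 1]], 0, 3): A returns False, B raises IndexError
import Mathlib
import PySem

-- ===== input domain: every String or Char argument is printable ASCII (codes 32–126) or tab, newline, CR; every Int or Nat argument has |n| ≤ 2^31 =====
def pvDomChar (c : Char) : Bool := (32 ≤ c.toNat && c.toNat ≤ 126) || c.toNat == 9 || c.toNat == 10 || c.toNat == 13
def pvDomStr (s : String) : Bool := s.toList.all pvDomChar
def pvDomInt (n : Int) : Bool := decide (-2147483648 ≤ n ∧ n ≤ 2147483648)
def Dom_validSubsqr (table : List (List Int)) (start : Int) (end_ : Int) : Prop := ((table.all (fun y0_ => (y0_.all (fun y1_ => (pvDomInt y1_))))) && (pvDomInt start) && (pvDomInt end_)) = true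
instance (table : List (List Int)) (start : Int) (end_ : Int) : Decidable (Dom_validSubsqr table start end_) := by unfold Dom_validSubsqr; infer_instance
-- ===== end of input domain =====

-- B flattens all subsquare cells into one list and decides validity with a single
-- len(values) == len(set(values)) comparison instead of A's incremental membership
-- scan with early return.

-- ===== PORT A =====
-- inner j-loop: returns none where the Python 'return False' fires, else the updated st
def vsInner (table : List (List Int)) (i : Int) (js : List Int) (st : List Int) : Option (List Int) :=
  match js with
  | [] => some st
  | j :: rest =>
    if st.contains (PySem.List.pyGetD (PySem.List.pyGetD table i []) j 0) then none
    else vsInner table i rest (st ++ [PySem.List.pyGetD (PySem.List.pyGetD table i []) j 0])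

-- outer i-loop
def vsOuter (table : List (List Int)) (is js : List Int) (st : List Int) : Bool :=
  match is with
  | [] => true
  | i :: rest =>
    match vsInner table i js st with
    | none => false
    | some st' => vsOuter table rest js st'

def validSubsqr (table : List (List Int)) (start : Int) (end_ : Int) : Bool :=
  vsOuter table (PySem.List.pyRange start end_ 1) (PySem.List.pyRange start end_ 1) []

-- ===== PORT B =====
def validSubsqr_alt (table : List (List Int)) (start : Int) (end_ : Int) : Bool :=
  let r := PySem.List.pyRange start end_ 1
  let values := r.flatMap (fun i => r.map (fun j => PySem.List.pyGetD (PySem.List.pyGetD table i []) j 0))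
  values.length == (PySem.Set.ofList values).length

-- ===== PRECONDITION & SPEC =====
-- Pre_ excludes inputs where some index of the subsquare range is out of bounds: there the
-- Python A either raises IndexError, or (when a duplicate is met before the first bad index)
-- returns False while B's eager flatten raises IndexError — see claim.json "cites".
-- bounds check, short-circuited so it evaluates fast even for huge start/end_
def preOK (table : List (List Int)) (start : Int) (end_ : Int) : Bool :=
  if end_ ≤ start then true
  else if -(table.length : Int) ≤ start ∧ end_ ≤ (table.length : Int) then
    (PySem.List.pyRange start end_ 1).all fun i =>
      decide (-((PySem.List.pyGetD table i []).length : Int) ≤ start ∧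
              end_ ≤ ((PySem.List.pyGetD table i []).length : Int))
  else false

def Pre_validSubsqr (table : List (List Int)) (start : Int) (end_ : Int) : Prop :=
  preOK table start end_ = true
instance (table : List (List Int)) (start : Int) (end_ : Int) : Decidable (Pre_validSubsqr table start end_) := by unfold Pre_validSubsqr; infer_instance
def pvWitness_validSubsqr : List (List Int) × Int × Int := ([[1, 2, 0], [3, 4, 5], [6, 7, 8]], 1, 3)

def Spec_validSubsqr (table : List (List Int)) (start : Int) (end_ : Int) (out : Bool) : Prop := out = validSubsqr_alt table start end_
instance (table : List (List Int)) (start : Int) (end_ : Int) (out : Bool) : Decidable (Spec_validSubsqr table start end_ out) := by unfold Spec_validSubsqr; infer_instance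

-- ===== CLAIM (what is proved, stated in full; the proofs are below) =====
def Claim_equal_validSubsqr : Prop := ∀ (table : List (List Int)) (start : Int) (end_ : Int), Dom_validSubsqr table start end_ → Pre_validSubsqr table start end_ → Spec_validSubsqr table start end_ (validSubsqr table start end_)

-- ===== LEMMAS AND PROOFS =====

-- A's scan over the flattened value sequence (proof-only abstraction of vsInner/vsOuter)
def vsScan (vs st : List Int) : Bool :=
  match vs with
  | [] => true
  | v :: rest => if st.contains v then false else vsScan rest (st ++ [v])

def vsScanOpt (vs st : List Int) : Option (List Int) :=
  match vs with
  | [] => some st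
  | v :: rest => if st.contains v then none else vsScanOpt rest (st ++ [v])

theorem vsInner_eq (table : List (List Int)) (i : Int) (js st : List Int) :
    vsInner table i js st = vsScanOpt (js.map (fun j => PySem.List.pyGetD (PySem.List.pyGetD table i []) j 0)) st := by
  induction js generalizing st with
  | nil => rfl
  | cons j rest ih => simp [vsInner, vsScanOpt, ih]

theorem vsScan_append (xs ys st : List Int) :
    vsScan (xs ++ ys) st = match vsScanOpt xs st with
      | none => false
      | some st' => vsScan ys st' := by
  induction xs generalizing st with
  | nil => rfl
  | cons x rest ih =>
    simp only [List.cons_append, vsScan, vsScanOpt]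
    split_ifs with h
    · rfl
    · exact ih _

theorem vsOuter_eq (table : List (List Int)) (is js st : List Int) :
    vsOuter table is js st =
      vsScan (is.flatMap (fun i => js.map (fun j => PySem.List.pyGetD (PySem.List.pyGetD table i []) j 0))) st := by
  induction is generalizing st with
  | nil => rfl
  | cons i rest ih =>
    simp only [vsOuter, List.flatMap_cons, vsScan_append, vsInner_eq]
    cases vsScanOpt (js.map (fun j => PySem.List.pyGetD (PySem.List.pyGetD table i []) j 0)) st with
    | none => rfl
    | some st' => exact ih st'

theorem vsScan_eq_decide (vs st : List Int) :
    vsScan vs st = decide (vs.Nodup ∧ ∀ v ∈ vs, v ∉ st) := by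
  induction vs generalizing st with
  | nil => simp [vsScan]
  | cons v rest ih =>
    by_cases h : v ∈ st
    · simp [vsScan, List.contains_eq_mem, h]
    · simp only [vsScan, List.contains_eq_mem, h, decide_false, Bool.false_eq_true, if_false, ih,
        decide_eq_decide, List.nodup_cons]
      constructor
      · rintro ⟨hn, hall⟩
        have hvr : v ∉ rest := fun hv => hall v hv (by simp)
        refine ⟨⟨hvr, hn⟩, ?_⟩
        intro x hx
        rcases List.mem_cons.mp hx with rfl | hx'
        · exact h
        · intro hxst
          exact hall x hx' (by simp [hxst])
      · rintro ⟨⟨hvr, hn⟩, hall⟩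
        refine ⟨hn, ?_⟩
        intro x hx hxst
        rcases List.mem_append.mp hxst with hxs | hxv
        · exact hall x (List.mem_cons_of_mem _ hx) hxs
        · rw [List.mem_singleton] at hxv; subst hxv; exact hvr hx

theorem set_len_eq_iff_nodup (vs : List Int) :
    ((vs.length == (PySem.Set.ofList vs).length) = true) ↔ vs.Nodup := by
  have hfin : (PySem.Set.ofList vs).toFinset = vs.toFinset := by
    ext x; simp [PySem.Set.mem_ofList]
  have hnd : (PySem.Set.ofList vs).Nodup := PySem.Set.nodup_ofList vs
  have hcard : vs.toFinset.card = (PySem.Set.ofList vs).length := by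
    rw [← hfin]; exact List.toFinset_card_of_nodup hnd
  constructor
  · intro h
    have hl : vs.length = (PySem.Set.ofList vs).length := by simpa using h
    have hc : vs.toFinset.card = vs.length := hcard.trans hl.symm
    have := Multiset.toFinset_card_eq_card_iff_nodup.mp (by simpa using hc)
    simpa using this
  · intro h
    have := List.toFinset_card_of_nodup h
    simp only [beq_iff_eq]
    omega

-- ===== VERDICT (by name: the statement is the Claim_ definition above) =====
theorem validSubsqr_spec : Claim_equal_validSubsqr := by
  intro table start end_ _ _
  unfold Spec_validSubsqr validSubsqr validSubsqr_alt
  rw [vsOuter_eq, vsScan_eq_decide]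
  simp only [List.not_mem_nil, not_false_iff, implies_true, and_true]
  by_cases hn : (List.flatMap (fun i => (PySem.List.pyRange start end_ 1).map
      (fun j => PySem.List.pyGetD (PySem.List.pyGetD table i []) j 0))
      (PySem.List.pyRange start end_ 1)).Nodup
  · rw [decide_eq_true hn, Eq.comm]
    exact (set_len_eq_iff_nodup _).mpr hn
  · rw [decide_eq_false hn, Eq.comm, ← Bool.not_eq_true]
    exact fun hh => hn ((set_len_eq_iff_nodup _).mp hh)
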